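-- pv_equiv track=rewrite | github.com/svinther/EverybodyCodes | 2025/ec16.py | compute_spell
-- ===== SOURCE A (Python) =====
-- def compute_spell(blockcounts: list[int]) -> str:
--     rnotes = []
--     for i in range(1, len(blockcounts) + 1):
--         if blockcounts[i - 1] == 1:
--             for j in range(1, len(blockcounts) + 1):
--                 if j % i == 0:
--                     blockcounts[j - 1] -= 1
--             rnotes.append(str(i))
--     return ",".join(rnotes)
-- ===== SOURCE B (Python) =====
-- def compute_spell(blockcounts: list[int]) -> str:
--     n = len(blockcounts)
--     selected = []
--     notes = []
--     for i in range(1, n + 1):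
--         c = 0
--         for d in selected:
--             if i % d == 0:
--                 c += 1
--         if blockcounts[i - 1] - c == 1:
--             selected.append(i)
--             notes.append(str(i))
--     return ",".join(notes)
-- ===== Notes on version B (the rewrite author's own statement) =====
-- stated objective: alternative
-- what changed: B never mutates or shadows the counts: it keeps a list of already-selected indices and, at each i, recomputes the effective count by counting selected divisors of i, instead of A's in-place decrement sweep over all n positions after every selection.
import Mathlib
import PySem

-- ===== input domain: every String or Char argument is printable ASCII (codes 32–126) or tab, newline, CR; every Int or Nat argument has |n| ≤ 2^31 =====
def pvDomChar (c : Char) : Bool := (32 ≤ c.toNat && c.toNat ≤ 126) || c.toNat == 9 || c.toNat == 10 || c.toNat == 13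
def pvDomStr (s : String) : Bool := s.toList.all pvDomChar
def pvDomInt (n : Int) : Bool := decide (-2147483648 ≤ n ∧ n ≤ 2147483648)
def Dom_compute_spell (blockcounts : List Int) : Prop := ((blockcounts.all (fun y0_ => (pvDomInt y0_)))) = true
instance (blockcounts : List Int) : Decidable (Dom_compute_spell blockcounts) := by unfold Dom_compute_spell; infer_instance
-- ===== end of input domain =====

-- B keeps a list of already-selected indices and recomputes each count by counting selected proper divisors,
-- instead of A's in-place decrement sweep (A mutates its argument; equivalence is about the RETURN value only).


-- ===== PORT A =====
def compute_spell (blockcounts : List Int) : String :=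
  let st := (PySem.List.pyRange 1 ((blockcounts.length : Int) + 1) 1).foldl
    (fun (st : List Int × List String) i =>
      if PySem.List.pyGetD st.1 (i - 1) 0 == 1 then
        ((PySem.List.pyRange 1 ((st.1.length : Int) + 1) 1).foldl
          (fun bc j =>
            if PySem.Int.mod j i == 0 then
              PySem.List.pySetD bc (j - 1) (PySem.List.pyGetD bc (j - 1) 0 - 1)
            else bc) st.1,
         st.2 ++ [PySem.Int.toStr i])
      else st)
    (blockcounts, [])
  PySem.Str.join "," st.2

-- ===== PORT B =====
def compute_spell_alt (blockcounts : List Int) : String :=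
  let n : Int := blockcounts.length
  let st := (PySem.List.pyRange 1 (n + 1) 1).foldl
    (fun (st : List Int × List String) i =>
      let c := st.1.foldl (fun acc d => if PySem.Int.mod i d == 0 then acc + 1 else acc) (0 : Int)
      if PySem.List.pyGetD blockcounts (i - 1) 0 - c == 1 then
        (st.1 ++ [i], st.2 ++ [PySem.Int.toStr i])
      else st)
    ([], [])
  PySem.Str.join "," st.2

-- ===== PRECONDITION & SPEC =====
def Spec_compute_spell (blockcounts : List Int) (out : String) : Prop := out = compute_spell_alt blockcounts
instance (blockcounts : List Int) (out : String) : Decidable (Spec_compute_spell blockcounts out) := by unfold Spec_compute_spell; infer_instance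

-- ===== CLAIM (what is proved, stated in full; the proofs are below) =====
def Claim_equal_compute_spell : Prop := ∀ (blockcounts : List Int), Dom_compute_spell blockcounts → Spec_compute_spell blockcounts (compute_spell blockcounts)

-- ===== LEMMAS AND PROOFS =====

-- number of already-selected divisors of k
def pvCnt (sel : List Int) (k : Int) : Int := ((sel.filter (fun d => decide (d ∣ k))).length : Int)

theorem pv_step_eq (orig dec : List Int) (j : Int)
    (hlen : dec.length = orig.length) (h1 : 1 ≤ j) (h2 : j ≤ (orig.length : Int)) :
    PySem.List.pySetD (List.zipWith (· - ·) orig dec) (j - 1)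
        (PySem.List.pyGetD (List.zipWith (· - ·) orig dec) (j - 1) 0 - 1) =
      List.zipWith (· - ·) orig
        (PySem.List.pySetD dec (j - 1) (PySem.List.pyGetD dec (j - 1) 0 + 1)) := by
  have hz : (List.zipWith (· - ·) orig dec).length = orig.length := by
    simp [List.length_zipWith, hlen]
  rw [PySem.List.pySetD_of_nonneg _ _ (by omega : (0:Int) ≤ j - 1), PySem.List.pySetD_of_nonneg _ _ (by omega : (0:Int) ≤ j - 1)]
  have hj : (j - 1).toNat < orig.length := by omega
  rw [PySem.List.pyGetD_eq_getElem _ _ (by omega) (by rw [hz]; omega),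
      PySem.List.pyGetD_eq_getElem _ _ (by omega) (by rw [hlen]; omega)]
  apply List.ext_getElem
  · simp [List.length_zipWith, hlen]
  · intro k hk1 hk2
    simp only [List.getElem_set, List.getElem_zipWith]
    by_cases hkj : k = (j - 1).toNat
    · subst hkj
      simp
      ring
    · have hne : ¬ ((j-1).toNat = k) := by omega
      rw [if_neg hne, if_neg hne]

theorem pv_foldl_len (js dec : List Int) :
    (js.foldl (fun d j => PySem.List.pySetD d (j - 1) (PySem.List.pyGetD d (j - 1) 0 + 1)) dec).length
      = dec.length := by
  induction js generalizing dec with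
  | nil => rfl
  | cons j js ih => simp [List.foldl_cons, ih, PySem.List.length_pySetD]

theorem pv_inner_eq (orig : List Int) (js : List Int) (dec : List Int)
    (hlen : dec.length = orig.length)
    (hjs : ∀ j ∈ js, 1 ≤ j ∧ j ≤ (orig.length : Int)) :
    js.foldl (fun bc j => PySem.List.pySetD bc (j - 1) (PySem.List.pyGetD bc (j - 1) 0 - 1))
        (List.zipWith (· - ·) orig dec) =
      List.zipWith (· - ·) orig
        (js.foldl (fun d j => PySem.List.pySetD d (j - 1) (PySem.List.pyGetD d (j - 1) 0 + 1)) dec) := by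
  induction js generalizing dec with
  | nil => rfl
  | cons j js ih =>
    have hj := hjs j (by simp)
    simp only [List.foldl_cons]
    rw [pv_step_eq orig dec j hlen hj.1 hj.2]
    exact ih _ (by simp [PySem.List.length_pySetD, hlen]) (fun x hx => hjs x (by simp [hx]))

theorem pv_filter_range_eq_multiples (i b : Int) (hi : 1 ≤ i) :
    (PySem.List.pyRange 1 b 1).filter (fun j => PySem.Int.mod j i == 0) =
      PySem.List.pyRange i b i := by
  have hpos : (0:Int) < i := by omega
  have hmem : ∀ x : Int, (x ∈ (PySem.List.pyRange 1 b 1).filter (fun j => PySem.Int.mod j i == 0))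
      ↔ x ∈ PySem.List.pyRange i b i := by
    intro x
    simp only [List.mem_filter, PySem.List.mem_pyRange_one,
      PySem.List.mem_pyRange_iff_of_pos hpos, beq_iff_eq, PySem.Int.mod_eq_zero_iff_dvd]
    constructor
    · rintro ⟨⟨h1, h2⟩, hd⟩
      exact ⟨Int.le_of_dvd (by omega) hd, h2, dvd_sub hd dvd_rfl⟩
    · rintro ⟨h1, h2, hd⟩
      have : i ∣ x := by have := dvd_add hd (dvd_refl i); simpa using this
      exact ⟨⟨by omega, h2⟩, this⟩
  have hnodup2 : (PySem.List.pyRange i b i).Nodup := by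
    rw [PySem.List.pyRange_of_pos _ _ hpos]
    refine (List.nodup_range).map (fun a b' hab => ?_)
    have h2 : i * (a:Int) = i * b' := by omega
    exact_mod_cast mul_left_cancel₀ (by omega : i ≠ 0) h2
  have hpw2 : (PySem.List.pyRange i b i).Pairwise (· < ·) := by
    rw [PySem.List.pyRange_of_pos _ _ hpos]
    refine (List.pairwise_lt_range).map _ (fun a b' hab => ?_)
    have h := mul_lt_mul_of_pos_left (show (a:Int) < b' from by exact_mod_cast hab) hpos
    omega
  refine List.Perm.eq_of_pairwise (le := (· < ·)) (fun a b' _ _ h1 h2 => by omega) ?_ hpw2 ?_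
  · exact (PySem.List.pairwise_lt_pyRange_one 1 b).filter _
  · exact List.perm_of_nodup_nodup_toFinset_eq
      ((PySem.List.nodup_pyRange_one 1 b).filter _) hnodup2
      (by ext x; simp only [List.mem_toFinset]; exact hmem x)

theorem pv_nodup_multiples (i b : Int) (hpos : (0:Int) < i) :
    (PySem.List.pyRange i b i).Nodup := by
  rw [PySem.List.pyRange_of_pos _ _ hpos]
  refine (List.nodup_range).map (fun a b' hab => ?_)
  have h2 : i * (a:Int) = i * b' := by omega
  exact_mod_cast mul_left_cancel₀ (by omega : i ≠ 0) h2

theorem pv_mem_multiples (i k n : Int) (hi : 1 ≤ i) (hk1 : 1 ≤ k) (hk2 : k ≤ n) :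
    (k ∈ PySem.List.pyRange i (n + 1) i) ↔ i ∣ k := by
  rw [PySem.List.mem_pyRange_iff_of_pos (by omega : (0:Int) < i)]
  constructor
  · rintro ⟨h1, h2, hd⟩
    have := dvd_add hd (dvd_refl i)
    simpa using this
  · intro hd
    exact ⟨Int.le_of_dvd (by omega) hd, by omega, dvd_sub hd dvd_rfl⟩

-- a conditional-increment fold is the length of the corresponding filter
theorem pv_count_fold (js : List Int) (p : Int → Bool) (c : Int) :
    js.foldl (fun acc d => if p d then acc + 1 else acc) c = c + ((js.filter p).length : Int) := by
  induction js generalizing c with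
  | nil => simp
  | cons j js ih =>
    by_cases h : p j <;> simp [List.filter_cons, h, ih] <;> push_cast <;> ring

-- counting the selected divisors of i is the filter over sel by divisibility
theorem pv_count_eq (i : Int) (sel : List Int) :
    ((sel.filter (fun d => PySem.Int.mod i d == 0)).length : Int) = pvCnt sel i := by
  unfold pvCnt
  congr 2
  refine List.filter_congr (fun d _ => ?_)
  rw [Bool.eq_iff_iff]
  simp [PySem.Int.mod_eq_zero_iff_dvd]

theorem pv_getD_setD (dec : List Int) (j k : Int)
    (hj1 : 1 ≤ j) (hj2 : j ≤ (dec.length : Int)) (hk1 : 1 ≤ k) (hk2 : k ≤ (dec.length : Int)) :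
    PySem.List.pyGetD (PySem.List.pySetD dec (j - 1) (PySem.List.pyGetD dec (j - 1) 0 + 1)) (k - 1) 0
      = PySem.List.pyGetD dec (k - 1) 0 + (if k = j then 1 else 0) := by
  rw [PySem.List.pySetD_of_nonneg _ _ (by omega : (0:Int) ≤ j - 1)]
  have hk' : PySem.List.pyGetD dec (k - 1) 0 = dec[(k - 1).toNat]'(by omega) :=
    PySem.List.pyGetD_eq_getElem _ _ (by omega) (by omega)
  have hs : PySem.List.pyGetD (dec.set (j - 1).toNat (PySem.List.pyGetD dec (j - 1) 0 + 1)) (k - 1) 0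
      = (dec.set (j - 1).toNat (PySem.List.pyGetD dec (j - 1) 0 + 1))[(k - 1).toNat]'(by
          simp [List.length_set]; omega) :=
    PySem.List.pyGetD_eq_getElem _ _ (by omega) (by simp [List.length_set]; omega)
  rw [hs, hk', List.getElem_set]
  by_cases hkj : k = j
  · subst hkj
    simp [hk']
  · have hne : ¬ ((j - 1).toNat = (k - 1).toNat) := by omega
    rw [if_neg hne, if_neg hkj, add_zero]

-- the multiples-increment fold adds exactly 1 at the members of js
theorem pv_incr_fold (js : List Int) (dec : List Int) (k : Int)
    (hnd : js.Nodup) (hjs : ∀ j ∈ js, 1 ≤ j ∧ j ≤ (dec.length : Int))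
    (hk1 : 1 ≤ k) (hk2 : k ≤ (dec.length : Int)) :
    PySem.List.pyGetD
        (js.foldl (fun d j => PySem.List.pySetD d (j - 1) (PySem.List.pyGetD d (j - 1) 0 + 1)) dec)
        (k - 1) 0
      = PySem.List.pyGetD dec (k - 1) 0 + (if k ∈ js then 1 else 0) := by
  induction js generalizing dec with
  | nil => simp
  | cons j js ih =>
    have hj := hjs j (by simp)
    have hlen : (PySem.List.pySetD dec (j - 1) (PySem.List.pyGetD dec (j - 1) 0 + 1)).length
        = dec.length := by simp [PySem.List.length_pySetD]
    simp only [List.foldl_cons]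
    rw [ih _ (hnd.of_cons) (fun x hx => by rw [hlen]; exact hjs x (by simp [hx]))
        (by rw [hlen]; omega)]
    rw [pv_getD_setD dec j k hj.1 hj.2 hk1 hk2]
    have hjnot : j ∉ js := by simp at hnd; exact hnd.1
    by_cases hkj : k = j
    · subst hkj
      simp [hjnot]
    · simp [hkj, List.mem_cons]

-- A's fold over mutated counts equals the dec-array fold (same selections, counts = orig - dec)
theorem pv_outer (orig : List Int) (fuel : Nat) :
    ∀ (a : Int), 1 ≤ a → (((orig.length : Int) + 1 - a).toNat = fuel) →
    ∀ (dec : List Int) (rn : List String), dec.length = orig.length →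
    (PySem.List.pyRange a ((orig.length : Int) + 1) 1).foldl
        (fun (st : List Int × List String) i =>
          if PySem.List.pyGetD st.1 (i - 1) 0 == 1 then
            ((PySem.List.pyRange 1 ((st.1.length : Int) + 1) 1).foldl
              (fun bc j =>
                if PySem.Int.mod j i == 0 then
                  PySem.List.pySetD bc (j - 1) (PySem.List.pyGetD bc (j - 1) 0 - 1)
                else bc) st.1,
             st.2 ++ [PySem.Int.toStr i])
          else st)
        (List.zipWith (· - ·) orig dec, rn) =
      (List.zipWith (· - ·) orig
        ((PySem.List.pyRange a ((orig.length : Int) + 1) 1).foldl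
          (fun (st : List Int × List String) i =>
            if PySem.List.pyGetD orig (i - 1) 0 - PySem.List.pyGetD st.1 (i - 1) 0 == 1 then
              ((PySem.List.pyRange i ((orig.length : Int) + 1) i).foldl
                (fun d j => PySem.List.pySetD d (j - 1) (PySem.List.pyGetD d (j - 1) 0 + 1)) st.1,
               st.2 ++ [PySem.Int.toStr i])
            else st)
          (dec, rn)).1,
       ((PySem.List.pyRange a ((orig.length : Int) + 1) 1).foldl
          (fun (st : List Int × List String) i =>
            if PySem.List.pyGetD orig (i - 1) 0 - PySem.List.pyGetD st.1 (i - 1) 0 == 1 then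
              ((PySem.List.pyRange i ((orig.length : Int) + 1) i).foldl
                (fun d j => PySem.List.pySetD d (j - 1) (PySem.List.pyGetD d (j - 1) 0 + 1)) st.1,
               st.2 ++ [PySem.Int.toStr i])
            else st)
          (dec, rn)).2) := by
  induction fuel with
  | zero =>
    intro a ha hf dec rn hlen
    have hend : (orig.length : Int) + 1 ≤ a := by omega
    rw [PySem.List.pyRange_one_eq_nil hend]
    simp
  | succ m ih =>
    intro a ha hf dec rn hlen
    have hab : a < (orig.length : Int) + 1 := by omega
    rw [PySem.List.pyRange_one_cons hab]
    simp only [List.foldl_cons]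
    have hcond : (PySem.List.pyGetD (List.zipWith (· - ·) orig dec) (a - 1) 0 == 1)
        = (PySem.List.pyGetD orig (a - 1) 0 - PySem.List.pyGetD dec (a - 1) 0 == 1) := by
      rw [PySem.List.pyGetD_eq_getElem _ _ (by omega) (by simp [List.length_zipWith, hlen]; omega),
          PySem.List.pyGetD_eq_getElem _ _ (by omega) (by omega),
          PySem.List.pyGetD_eq_getElem _ _ (by omega) (by rw [hlen]; omega)]
      simp [List.getElem_zipWith]
    by_cases hc : (PySem.List.pyGetD orig (a - 1) 0 - PySem.List.pyGetD dec (a - 1) 0 == 1) = true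
    · have hzlen : ((List.zipWith (· - ·) orig dec).length : Int) = (orig.length : Int) := by
        simp [List.length_zipWith, hlen]
      rw [hcond, if_pos hc, if_pos hc, hzlen]
      have hinner :
          List.foldl (fun bc j => if (PySem.Int.mod j a == 0) = true then
              PySem.List.pySetD bc (j - 1) (PySem.List.pyGetD bc (j - 1) 0 - 1) else bc)
            (List.zipWith (· - ·) orig dec) (PySem.List.pyRange 1 ((orig.length : Int) + 1))
          = List.zipWith (· - ·) orig
              (List.foldl (fun d j => PySem.List.pySetD d (j - 1) (PySem.List.pyGetD d (j - 1) 0 + 1))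
                dec (PySem.List.pyRange a ((orig.length : Int) + 1) a)) := by
        rw [← List.foldl_filter, pv_filter_range_eq_multiples a ((orig.length : Int) + 1) ha]
        exact pv_inner_eq orig _ dec hlen (fun j hj => by
          obtain ⟨h1, h2, -⟩ := (PySem.List.mem_pyRange_iff_of_pos (by omega : (0:Int) < a) j).mp hj
          exact ⟨by omega, by omega⟩)
      rw [hinner]
      exact ih (a + 1) (by omega) (by omega) _ _ (by rw [pv_foldl_len]; exact hlen)
    · rw [hcond, if_neg hc, if_neg hc]
      exact ih (a + 1) (by omega) (by omega) dec rn hlen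

-- the dec-array fold and B's selected-divisors fold produce the same notes
theorem pv_dec_sel (orig : List Int) (fuel : Nat) :
    ∀ (a : Int), 1 ≤ a → (((orig.length : Int) + 1 - a).toNat = fuel) →
    ∀ (dec : List Int) (sel : List Int) (rn : List String),
    dec.length = orig.length →
    (∀ k : Int, 1 ≤ k → k ≤ (orig.length : Int) →
      PySem.List.pyGetD dec (k - 1) 0 = pvCnt sel k) →
    ((PySem.List.pyRange a ((orig.length : Int) + 1) 1).foldl
        (fun (st : List Int × List String) i =>
          if PySem.List.pyGetD orig (i - 1) 0 - PySem.List.pyGetD st.1 (i - 1) 0 == 1 then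
            ((PySem.List.pyRange i ((orig.length : Int) + 1) i).foldl
              (fun d j => PySem.List.pySetD d (j - 1) (PySem.List.pyGetD d (j - 1) 0 + 1)) st.1,
             st.2 ++ [PySem.Int.toStr i])
          else st)
        (dec, rn)).2 =
      ((PySem.List.pyRange a ((orig.length : Int) + 1) 1).foldl
        (fun (st : List Int × List String) i =>
          let c := st.1.foldl (fun acc d => if PySem.Int.mod i d == 0 then acc + 1 else acc) (0 : Int)
          if PySem.List.pyGetD orig (i - 1) 0 - c == 1 then
            (st.1 ++ [i], st.2 ++ [PySem.Int.toStr i])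
          else st)
        (sel, rn)).2 := by
  induction fuel with
  | zero =>
    intro a ha hf dec sel rn hlen hcnt
    have hend : (orig.length : Int) + 1 ≤ a := by omega
    rw [PySem.List.pyRange_one_eq_nil hend]
    simp
  | succ m ih =>
    intro a ha hf dec sel rn hlen hcnt
    have hab : a < (orig.length : Int) + 1 := by omega
    rw [PySem.List.pyRange_one_cons hab]
    simp only [List.foldl_cons]
    have hc : sel.foldl (fun acc d => if PySem.Int.mod a d == 0 then acc + 1 else acc) (0 : Int)
        = PySem.List.pyGetD dec (a - 1) 0 := by
      rw [pv_count_fold, pv_count_eq a sel, hcnt a ha (by omega), zero_add]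
    rw [hc]
    by_cases hcc : (PySem.List.pyGetD orig (a - 1) 0 - PySem.List.pyGetD dec (a - 1) 0 == 1) = true
    · rw [if_pos hcc, if_pos hcc]
      refine ih (a + 1) (by omega) (by omega) _ (sel ++ [a]) _ (by rw [pv_foldl_len]; exact hlen)
        ?_
      · intro k hk1 hk2
        rw [pv_incr_fold _ dec k (pv_nodup_multiples a _ (by omega))
            (fun j hj => by
              obtain ⟨h1, h2, -⟩ :=
                (PySem.List.mem_pyRange_iff_of_pos (by omega : (0:Int) < a) j).mp hj
              constructor <;> omega)
            hk1 (by omega), hcnt k hk1 hk2]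
        unfold pvCnt
        rw [List.filter_append]
        by_cases hdvd : a ∣ k
        · rw [if_pos ((pv_mem_multiples a k _ ha hk1 hk2).mpr hdvd)]
          simp [hdvd]
        · rw [if_neg (fun h => hdvd ((pv_mem_multiples a k _ ha hk1 hk2).mp h))]
          simp [hdvd]
    · rw [if_neg hcc, if_neg hcc]
      exact ih (a + 1) (by omega) (by omega) dec sel rn hlen hcnt

theorem pv_zip_replicate (xs : List Int) :
    List.zipWith (· - ·) xs (List.replicate xs.length (0 : Int)) = xs := by
  induction xs with
  | nil => rfl
  | cons x t ih => simp only [List.length_cons, List.replicate_succ, List.zipWith_cons_cons, ih, sub_zero]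

theorem pv_getD_replicate (n : Nat) (k : Int) (h1 : 1 ≤ k) (h2 : k ≤ (n : Int)) :
    PySem.List.pyGetD (List.replicate n (0 : Int)) (k - 1) 0 = 0 := by
  rw [PySem.List.pyGetD_eq_getElem _ _ (by omega) (by simp; omega)]
  simp

-- ===== VERDICT (by name: the statement is the Claim_ definition above) =====
theorem compute_spell_spec : Claim_equal_compute_spell := by
  intro blockcounts _
  simp only [Spec_compute_spell, compute_spell, compute_spell_alt]
  have h := pv_outer blockcounts (((blockcounts.length : Int) + 1 - 1).toNat) 1 (by omega) rfl
    (List.replicate blockcounts.length 0) [] (by simp)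
  rw [pv_zip_replicate] at h
  rw [h]
  congr 1
  exact pv_dec_sel blockcounts (((blockcounts.length : Int) + 1 - 1).toNat) 1 (by omega) rfl
    (List.replicate blockcounts.length 0) [] [] (by simp)
    (fun k hk1 hk2 => by rw [pv_getD_replicate _ k hk1 hk2]; simp [pvCnt])
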